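-- pv_equiv track=rewrite | github.com/szun8/Algorithm | 프로그래머스/2/135807. 숫자 카드 나누기/숫자 카드 나누기.py | GetmaxN
-- ===== SOURCE A (Python) =====
-- import math
--
-- def GetmaxN(array):
--     sqrt = int(math.sqrt(array[0]))
--     divisor = [array[0]]
--     for i in range(2, sqrt+1):
--         if(array[0]%i == 0):
--             divisor.append(i)
--             divisor.append(array[0]//i)
--     divisor.sort()
--
--     max = -1
--     while divisor:
--         isMod = True
--         for i in range(1, len(array)):
--             if(array[i] % divisor[-1] != 0):
--                 divisor.pop()
--                 isMod = False
--                 break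
--         if(isMod):
--             max = divisor[-1]
--             break
--     return max
-- ===== SOURCE B (Python) =====
-- import math
--
-- def GetmaxN(array):
--     g = 0
--     for x in array:
--         g = math.gcd(g, x)
--     return g if g > 1 else -1
-- ===== Notes on version B (the rewrite author's own statement) =====
-- stated objective: alternative
-- what changed: Replaces A's divisor enumeration of array[0] plus repeated scan-and-pop over the sorted divisor list with a single gcd fold over the whole array, returning the gcd if it exceeds 1 and -1 otherwise (shorter and immune to large divisor counts, though not measurably faster on the generated inputs).
-- intended difference: On arrays whose first element is 1, A returns 1 (it seeds its candidate list with array[0] itself, bypassing its own >1 rule that makes it return -1 when no divisor greater than 1 works), while B returns -1, the intended 'no common divisor greater than 1' answer. — e.g. on GetmaxN([1, 2]): A returns 1, B returns -1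
-- outside the precondition, e.g. on GetmaxN([0]): A returns 0, B returns -1
import Mathlib
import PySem

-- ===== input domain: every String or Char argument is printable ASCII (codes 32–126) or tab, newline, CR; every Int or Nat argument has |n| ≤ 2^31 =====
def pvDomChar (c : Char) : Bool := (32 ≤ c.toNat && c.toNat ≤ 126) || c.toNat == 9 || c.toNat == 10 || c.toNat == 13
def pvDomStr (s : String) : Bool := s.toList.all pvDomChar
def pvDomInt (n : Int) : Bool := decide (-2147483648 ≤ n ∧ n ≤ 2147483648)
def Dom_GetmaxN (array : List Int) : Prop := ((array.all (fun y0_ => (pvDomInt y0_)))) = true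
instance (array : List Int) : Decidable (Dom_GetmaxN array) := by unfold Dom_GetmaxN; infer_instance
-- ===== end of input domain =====

-- B replaces A's divisor enumeration of array[0] + pop-scan over the sorted divisor list by a
-- single gcd fold over the array; on arrays starting with 1 B returns the intended -1 where A
-- returns 1 (stated as D_ below).


-- ===== PORT A =====
-- A's while loop: repeatedly look at the largest remaining divisor (the last of the ascending
-- sorted list = the head of its reverse), test it against array[1:] (rest.all short-circuits
-- exactly like A's inner for/break), pop it on failure; -1 when the list runs out.
def GetmaxN.loop (rest : List Int) : List Int → Int
  | [] => -1
  | d :: ds =>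
      if rest.all (fun x => PySem.Int.mod x d == 0) then d else GetmaxN.loop rest ds

def GetmaxN (array : List Int) : Int :=
  match array with
  | [] => -1                     -- Python: IndexError on array[0] (outside Pre_)
  | a0 :: rest =>
    if a0 < 0 then -1            -- Python: math.sqrt raises ValueError (outside Pre_)
    else
      -- int(math.sqrt(a0)) = Nat.sqrt a0 exactly for 0 ≤ a0 ≤ 2^31 (double sqrt is exact there)
      let sqrt : Int := ((a0.toNat.sqrt : Nat) : Int)
      let divisor : List Int :=
        (PySem.List.pyRange 2 (sqrt + 1) 1).foldl
          (fun acc i =>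
            if PySem.Int.mod a0 i == 0 then acc ++ [i, PySem.Int.floordiv a0 i] else acc)
          [a0]
      GetmaxN.loop rest (PySem.List.sorted divisor (fun x => x) false).reverse

-- ===== PORT B =====
def GetmaxN_alt (array : List Int) : Int :=
  let g : Int := array.foldl (fun g x => (Int.gcd g x : Int)) 0
  if g > 1 then g else -1

-- ===== PRECONDITION & SPEC =====
-- Pre_ excludes exactly the inputs where A raises (empty array: IndexError; negative first
-- element: ValueError in math.sqrt; zero first element with further elements: ZeroDivisionError)
-- together with the degenerate remaining corner [0] alone, where A's 0 and B's -1 are both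
-- unspecified answers to "largest common divisor greater than 1" of the single card 0.
def Pre_GetmaxN (array : List Int) : Prop := array ≠ [] ∧ 0 < array.headI
instance (array : List Int) : Decidable (Pre_GetmaxN array) := by unfold Pre_GetmaxN; infer_instance
def pvWitness_GetmaxN : List Int := [12, 18, 30]

-- On arrays whose first element is 1, A returns 1 (it seeds its candidate list with array[0]
-- itself, bypassing its own >1 rule that yields -1 when no divisor greater than 1 works), while
-- B returns -1, the intended "no common divisor greater than 1" answer.
def D_GetmaxN (array : List Int) : Prop := array.head? = some 1
instance (array : List Int) : Decidable (D_GetmaxN array) := by unfold D_GetmaxN; infer_instance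

def Spec_GetmaxN (array : List Int) (out : Int) : Prop := ¬ D_GetmaxN array → out = GetmaxN_alt array
instance (array : List Int) (out : Int) : Decidable (Spec_GetmaxN array out) := by unfold Spec_GetmaxN; infer_instance

def pvDiffWitness_GetmaxN : List Int := [1, 2]
def pvDiffWitnessOut_GetmaxN : Int × Int := (1, -1)

-- ===== CLAIM (what is proved, stated in full; the proofs are below) =====
def Claim_unchanged_GetmaxN : Prop := ∀ (array : List Int), Dom_GetmaxN array → Pre_GetmaxN array → Spec_GetmaxN array (GetmaxN array)
def Claim_changed_GetmaxN : Prop := Dom_GetmaxN (pvDiffWitness_GetmaxN) ∧ Pre_GetmaxN (pvDiffWitness_GetmaxN) ∧ D_GetmaxN (pvDiffWitness_GetmaxN) ∧ GetmaxN (pvDiffWitness_GetmaxN) = pvDiffWitnessOut_GetmaxN.1 ∧ GetmaxN_alt (pvDiffWitness_GetmaxN) = pvDiffWitnessOut_GetmaxN.2 ∧ pvDiffWitnessOut_GetmaxN.1 ≠ pvDiffWitnessOut_GetmaxN.2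
def Claim_exact_GetmaxN : Prop := ∀ (array : List Int), Dom_GetmaxN array → Pre_GetmaxN array → D_GetmaxN array → GetmaxN array ≠ GetmaxN_alt array

-- ===== LEMMAS AND PROOFS =====

-- the gcd fold of B stays positive once the accumulator is positive
lemma foldl_gcd_pos (rest : List Int) : ∀ (a : Int), 0 < a →
    0 < rest.foldl (fun g x => (Int.gcd g x : Int)) a := by
  induction rest with
  | nil => intro a ha; simpa using ha
  | cons x xs ih =>
      intro a ha
      simp only [List.foldl_cons]
      exact ih _ (by exact_mod_cast Int.gcd_pos_iff.mpr (Or.inl (by omega)))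

-- divisors of the gcd fold = common divisors of the accumulator and all list elements
lemma dvd_foldl_gcd_iff (rest : List Int) : ∀ (a d : Int),
    (d ∣ rest.foldl (fun g x => (Int.gcd g x : Int)) a ↔ d ∣ a ∧ ∀ x ∈ rest, d ∣ x) := by
  induction rest with
  | nil => intro a d; simp
  | cons x xs ih =>
      intro a d
      simp only [List.foldl_cons, ih, Int.dvd_coe_gcd_iff, List.mem_cons]
      constructor
      · rintro ⟨⟨h1, h2⟩, h3⟩
        refine ⟨h1, ?_⟩
        intro y hy
        rcases hy with rfl | hy
        · exact h2
        · exact h3 y hy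
      · rintro ⟨h1, h2⟩
        exact ⟨⟨h1, h2 x (Or.inl rfl)⟩, fun y hy => h2 y (Or.inr hy)⟩

-- membership in A's divisor list: exactly the divisors of a0 that are at least 2
lemma mem_divisorList (a0 : Int) (ha : 2 ≤ a0) (d : Int) :
    d ∈ (PySem.List.pyRange 2 (((a0.toNat.sqrt : Nat) : Int) + 1)).foldl
        (fun acc i =>
          if PySem.Int.mod a0 i == 0 then acc ++ [i, PySem.Int.floordiv a0 i] else acc)
        [a0]
      ↔ 2 ≤ d ∧ d ∣ a0 := by
  have hfold :
      (PySem.List.pyRange 2 (((a0.toNat.sqrt : Nat) : Int) + 1)).foldl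
        (fun acc i =>
          if PySem.Int.mod a0 i == 0 then acc ++ [i, PySem.Int.floordiv a0 i] else acc)
        [a0]
      = [a0] ++ (PySem.List.pyRange 2 (((a0.toNat.sqrt : Nat) : Int) + 1)).flatMap
          (fun i => if PySem.Int.mod a0 i == 0 then [i, PySem.Int.floordiv a0 i] else []) := by
    have hfun : (fun (acc : List Int) (i : Int) =>
        if PySem.Int.mod a0 i == 0 then acc ++ [i, PySem.Int.floordiv a0 i] else acc)
      = (fun acc i => acc ++ (if PySem.Int.mod a0 i == 0 then [i, PySem.Int.floordiv a0 i] else [])) := by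
      funext acc i
      split <;> simp
    rw [hfun, PySem.List.foldl_append_eq_flatMap]
  rw [hfold]
  have hsq1 : ((a0.toNat.sqrt : Int)) * ((a0.toNat.sqrt : Int)) ≤ a0 := by
    have := Nat.sqrt_le' a0.toNat
    have h0 : ((a0.toNat : Int)) = a0 := by omega
    nlinarith [this, h0, sq_nonneg ((a0.toNat.sqrt : Int))]
  have hsq2 : a0 < ((a0.toNat.sqrt : Int) + 1) * ((a0.toNat.sqrt : Int) + 1) := by
    have := Nat.lt_succ_sqrt' a0.toNat
    have h0 : ((a0.toNat : Int)) = a0 := by omega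
    push_cast at this ⊢
    nlinarith [this, h0]
  constructor
  · intro hmem
    simp only [List.mem_append, List.mem_singleton, List.mem_flatMap] at hmem
    rcases hmem with hda | ⟨i, hi, hd⟩
    · cases hda
      exact ⟨ha, dvd_refl _⟩
    · rw [PySem.List.mem_pyRange_one] at hi
      obtain ⟨hi2, hilt⟩ := hi
      by_cases hdvd : PySem.Int.mod a0 i == 0
      · simp only [hdvd, if_pos] at hd
        have hdvd' : i ∣ a0 := (PySem.Int.mod_eq_zero_iff_dvd a0 i).mp (by simpa using hdvd)
        obtain ⟨k, hk⟩ := hdvd'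
        have hipos : 0 < i := by omega
        have hkpos : 0 < k := by nlinarith
        have hisq : i ≤ a0.toNat.sqrt := by omega
        have hik : i ≤ k := by nlinarith
        have hfd : PySem.Int.floordiv a0 i = k := by
          rw [PySem.Int.floordiv_eq_ediv_of_pos hipos, hk, Int.mul_ediv_cancel_left _ (by omega)]
        rw [List.mem_cons, List.mem_singleton] at hd
        rcases hd with rfl | rfl
        · exact ⟨hi2, ⟨k, hk⟩⟩
        · rw [hfd]
          exact ⟨by omega, ⟨i, by rw [hk, mul_comm]⟩⟩
      · simp [hdvd] at hd
  · rintro ⟨hd2, k, hk⟩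
    have hdpos : 0 < d := by omega
    have hkpos : 0 < k := by nlinarith
    simp only [List.mem_append, List.mem_singleton, List.mem_flatMap]
    by_cases hdle : d ≤ (a0.toNat.sqrt : Int)
    · -- d itself is in range(2, sqrt+1)
      refine Or.inr ⟨d, PySem.List.mem_pyRange_one.mpr ⟨hd2, by omega⟩, ?_⟩
      have : PySem.Int.mod a0 d = 0 := (PySem.Int.mod_eq_zero_iff_dvd a0 d).mpr ⟨k, hk⟩
      simp [this]
    · by_cases hk1 : k = 1
      · left
        rw [hk, hk1, mul_one]
      · -- the cofactor k is in range(2, sqrt+1) and a0 // k = d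
        have hk2 : 2 ≤ k := by omega
        have hksq : k ≤ (a0.toNat.sqrt : Int) := by nlinarith
        refine Or.inr ⟨k, PySem.List.mem_pyRange_one.mpr ⟨hk2, by omega⟩, ?_⟩
        have hdvdk : k ∣ a0 := ⟨d, by linarith [hk, mul_comm d k]⟩
        have : PySem.Int.mod a0 k = 0 := (PySem.Int.mod_eq_zero_iff_dvd a0 k).mpr hdvdk
        simp only [this]
        have hfd : PySem.Int.floordiv a0 k = d := by
          rw [PySem.Int.floordiv_eq_ediv_of_pos (by omega), hk, mul_comm,
            Int.mul_ediv_cancel_left _ (by omega)]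
        simp [hfd]

-- the pop-loop returns -1 when no remaining candidate passes the test
lemma loop_none (rest : List Int) : ∀ (l : List Int),
    (∀ d ∈ l, ¬ (rest.all (fun x => PySem.Int.mod x d == 0)) = true) →
    GetmaxN.loop rest l = -1 := by
  intro l
  induction l with
  | nil => intro _; rfl
  | cons d ds ih =>
      intro h
      simp only [GetmaxN.loop, if_neg (h d (List.mem_cons_self))]
      exact ih (fun e he => h e (List.mem_cons_of_mem _ he))

-- on a descending candidate list containing g, where passing the test means dividing g,
-- the pop-loop returns g
lemma loop_max (rest : List Int) (g : Int) (hg : 0 < g) : ∀ (l : List Int),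
    l.Pairwise (fun a b => b ≤ a) → g ∈ l →
    (∀ d ∈ l, ((rest.all (fun x => PySem.Int.mod x d == 0)) = true ↔ d ∣ g)) →
    GetmaxN.loop rest l = g := by
  intro l
  induction l with
  | nil => intro _ hmem; cases hmem
  | cons d ds ih =>
      intro hpw hmem hchar
      rw [List.pairwise_cons] at hpw
      by_cases hP : (rest.all (fun x => PySem.Int.mod x d == 0)) = true
      · have hdg : d ∣ g := (hchar d List.mem_cons_self).mp hP
        have hle : d ≤ g := Int.le_of_dvd hg hdg
        have hge : g ≤ d := by
          rcases List.mem_cons.mp hmem with rfl | hmem'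
          · exact le_refl _
          · exact hpw.1 g hmem'
        simp only [GetmaxN.loop, if_pos hP]
        omega
      · have hgd : g ≠ d := fun h => hP ((hchar d List.mem_cons_self).mpr (h ▸ dvd_refl g))
        have hmem' : g ∈ ds := by
          rcases List.mem_cons.mp hmem with rfl | h
          · exact absurd rfl hgd
          · exact h
        simp only [GetmaxN.loop, if_neg hP]
        exact ih hpw.2 hmem' (fun e he => hchar e (List.mem_cons_of_mem _ he))

-- main equivalence on positive first element ≠ 1
lemma getmax_eq (a0 : Int) (rest : List Int) (ha : 2 ≤ a0) :
    GetmaxN (a0 :: rest) = GetmaxN_alt (a0 :: rest) := by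
  -- the gcd of the whole array, as B computes it
  set g : Int := rest.foldl (fun g x => (Int.gcd g x : Int)) a0 with hgdef
  have hBfold : (a0 :: rest).foldl (fun g x => (Int.gcd g x : Int)) 0 = g := by
    simp only [List.foldl_cons, hgdef]
    congr 1
    simp [Int.gcd]; omega
  have hgpos : 0 < g := foldl_gcd_pos rest a0 (by omega)
  have hgdvd : ∀ d : Int, (d ∣ g ↔ d ∣ a0 ∧ ∀ x ∈ rest, d ∣ x) := fun d =>
    dvd_foldl_gcd_iff rest a0 d
  have hga0 : g ∣ a0 := ((hgdvd g).mp (dvd_refl g)).1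
  -- the candidate list A scans, and its characterization
  set L : List Int :=
    (PySem.List.sorted
      ((PySem.List.pyRange 2 (((a0.toNat.sqrt : Nat) : Int) + 1)).foldl
        (fun acc i =>
          if PySem.Int.mod a0 i == 0 then acc ++ [i, PySem.Int.floordiv a0 i] else acc)
        [a0]) (fun x => x) false).reverse with hLdef
  have hmemL : ∀ d : Int, (d ∈ L ↔ 2 ≤ d ∧ d ∣ a0) := by
    intro d
    rw [hLdef, List.mem_reverse, PySem.List.mem_sorted]
    exact mem_divisorList a0 ha d
  have hpwL : L.Pairwise (fun a b => b ≤ a) := by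
    rw [hLdef, List.pairwise_reverse]
    exact PySem.List.sorted_pairwise _ (fun x => x)
  have hA : GetmaxN (a0 :: rest) = GetmaxN.loop rest L := by
    rw [hLdef]
    simp only [GetmaxN, if_neg (by omega : ¬ a0 < 0)]
  -- passing the test ↔ dividing all of rest; for candidates (divisors of a0) ↔ dividing g
  have hchar : ∀ d ∈ L, ((rest.all (fun x => PySem.Int.mod x d == 0)) = true ↔ d ∣ g) := by
    intro d hd
    obtain ⟨hd2, hda0⟩ := (hmemL d).mp hd
    rw [List.all_eq_true]
    constructor
    · intro h
      exact (hgdvd d).mpr ⟨hda0, fun x hx => (PySem.Int.mod_eq_zero_iff_dvd x d).mp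
        (by simpa using h x hx)⟩
    · intro h x hx
      have := ((hgdvd d).mp h).2 x hx
      simpa using (PySem.Int.mod_eq_zero_iff_dvd x d).mpr this
  by_cases hg2 : 2 ≤ g
  · -- g itself is a candidate; the scan from the top returns it
    have hgL : g ∈ L := (hmemL g).mpr ⟨hg2, hga0⟩
    rw [hA, loop_max rest g hgpos L hpwL hgL hchar]
    simp only [GetmaxN_alt, hBfold]
    rw [if_pos (by omega)]
  · -- g = 1: no candidate (all ≥ 2) divides g, the list empties out, both sides give -1
    have hg1 : g = 1 := by omega
    rw [hA, loop_none rest L ?_]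
    · simp only [GetmaxN_alt, hBfold]
      rw [if_neg (by omega)]
    · intro d hd h
      obtain ⟨hd2, _⟩ := (hmemL d).mp hd
      have := (hchar d hd).mp h
      rw [hg1] at this
      have := Int.le_of_dvd (by omega) this
      omega

-- B's fold is constantly 1 once the accumulator reaches 1 (used for the tight claim)
lemma foldl_gcd_one (rest : List Int) :
    rest.foldl (fun g x => (Int.gcd g x : Int)) 1 = 1 := by
  induction rest with
  | nil => rfl
  | cons x xs ih =>
      simp only [List.foldl_cons, Int.one_gcd, Nat.cast_one]
      exact ih

-- A returns 1 on any array starting with 1: divisor list = [1] and 1 divides everything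
lemma getmax_one (rest : List Int) : GetmaxN (1 :: rest) = 1 := by
  simp only [GetmaxN, if_neg (by omega : ¬ (1 : Int) < 0)]
  have h1 : ((1 : Int).toNat.sqrt : Int) = 1 := by decide
  norm_num [h1]
  have hsorted : PySem.List.sorted [(1 : Int)] (fun x => x) false = [1] := by decide
  rw [hsorted]
  simp only [List.reverse_singleton, GetmaxN.loop]
  rw [if_pos]
  rw [List.all_eq_true]
  intro x _
  simp

-- ===== VERDICT (by name: the statement is the Claim_ definition above) =====
theorem GetmaxN_spec : Claim_unchanged_GetmaxN := by
  unfold Claim_unchanged_GetmaxN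
  intro array _ hpre hnd
  obtain ⟨hne, hpos⟩ := hpre
  match array with
  | a0 :: rest =>
    simp only [List.headI] at hpos
    have h1 : a0 ≠ 1 := fun h => hnd (by simp [D_GetmaxN, h])
    unfold Spec_GetmaxN at *
    exact getmax_eq a0 rest (by omega)

theorem GetmaxN_changed : Claim_changed_GetmaxN := by
  unfold Claim_changed_GetmaxN; decide

theorem GetmaxN_tight : Claim_exact_GetmaxN := by
  unfold Claim_exact_GetmaxN
  intro array _ hpre hd
  obtain ⟨hne, _⟩ := hpre
  match array with
  | a0 :: rest =>
    simp only [D_GetmaxN, List.head?_cons, Option.some_inj] at hd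
    subst hd
    rw [getmax_one rest]
    simp only [GetmaxN_alt, List.foldl_cons]
    have : (Int.gcd 0 1 : Int) = 1 := by decide
    rw [this, foldl_gcd_one]
    norm_num
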